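-- pv_equiv track=rewrite | github.com/MadeehaM/python-coding | powerplay/3.py | power4
-- ===== SOURCE A (Python) =====
-- def power4(number):
--     count = 0
--     if number & (number-1) ==0:
--         while number>1:
--             number >>= 1
--             count +=1
--         return count % 2 ==0
--     return False
-- ===== SOURCE B (Python) =====
-- def power4(number):
--     # power of 4 test in closed arithmetic: a positive power of two is a
--     # power of four exactly when its residue modulo three is one
--     return number > 0 and number & (number - 1) == 0 and number % 3 == 1
-- ===== Notes on version B (the rewrite author's own statement) =====
-- stated objective: simpler
-- what changed: replaces the shift-counting while loop over the exponent by a closed-form modulo-three residue test on top of the power-of-two mask, with no loop at all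
-- intended difference: On a zero input A's loop never runs and it returns True although zero is no power of four; B returns False, the intended answer. — e.g. on power4(0): A returns true, B returns false
import Mathlib
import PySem

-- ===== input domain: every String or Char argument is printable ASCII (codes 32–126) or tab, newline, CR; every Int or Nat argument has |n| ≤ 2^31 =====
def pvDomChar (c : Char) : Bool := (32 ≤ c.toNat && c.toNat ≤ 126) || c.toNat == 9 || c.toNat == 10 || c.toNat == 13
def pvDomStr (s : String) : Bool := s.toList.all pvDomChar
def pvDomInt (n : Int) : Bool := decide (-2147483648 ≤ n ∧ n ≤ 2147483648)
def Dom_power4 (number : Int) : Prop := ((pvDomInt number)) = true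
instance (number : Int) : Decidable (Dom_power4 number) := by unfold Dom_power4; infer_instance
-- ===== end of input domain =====

-- B replaces A's shift-counting while loop by a closed-form modulo-three residue test on top of
-- the same power-of-two mask (simpler; loop-free).

-- ===== PORT A =====
-- the while loop: number >>= 1; count += 1  while number > 1, returning the final count
def powLoop (number : Int) (count : Int) : Int :=
  if 1 < number then powLoop (number >>> (1 : Nat)) (count + 1) else count
termination_by number.toNat
decreasing_by
  have h2 : number >>> (1 : Nat) = number / 2 := by
    simpa using Int.shiftRight_eq_div_pow number 1
  omega

def power4 (number : Int) : Bool :=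
  if PySem.Int.band number (number - 1) = 0 then
    decide (PySem.Int.mod (powLoop number 0) 2 = 0)
  else false

-- ===== PORT B =====
def power4_alt (number : Int) : Bool :=
  decide (0 < number) && decide (PySem.Int.band number (number - 1) = 0)
    && decide (PySem.Int.mod number 3 = 1)

-- ===== PRECONDITION & SPEC =====
-- On number == 0 A's loop never runs and it returns True although zero is no power of four;
-- B returns False, the intended answer.
def D_power4 (number : Int) : Prop := number = 0
instance (number : Int) : Decidable (D_power4 number) := by unfold D_power4; infer_instance
def Spec_power4 (number : Int) (out : Bool) : Prop := ¬ D_power4 number → out = power4_alt number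
instance (number : Int) (out : Bool) : Decidable (Spec_power4 number out) := by unfold Spec_power4; infer_instance
def pvDiffWitness_power4 : Int := 0
def pvDiffWitnessOut_power4 : Bool × Bool := (true, false)

-- ===== CLAIM (what is proved, stated in full; the proofs are below) =====
def Claim_unchanged_power4 : Prop := ∀ (number : Int), Dom_power4 number → Spec_power4 number (power4 number)
def Claim_changed_power4 : Prop := Dom_power4 (pvDiffWitness_power4) ∧ D_power4 (pvDiffWitness_power4) ∧ power4 (pvDiffWitness_power4) = pvDiffWitnessOut_power4.1 ∧ power4_alt (pvDiffWitness_power4) = pvDiffWitnessOut_power4.2 ∧ pvDiffWitnessOut_power4.1 ≠ pvDiffWitnessOut_power4.2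
def Claim_exact_power4 : Prop := ∀ (number : Int), Dom_power4 number → D_power4 number → power4 number ≠ power4_alt number

-- ===== LEMMAS AND PROOFS =====

theorem band_pred_neg (n : Int) (h : n < 0) : PySem.Int.band n (n - 1) < 0 := by
  simp only [PySem.Int.band, if_neg (by omega : ¬ (0:Int) ≤ n),
    if_neg (by omega : ¬ (0:Int) ≤ n - 1)]
  omega

theorem band_pred_pos (n : Int) (h : 0 < n) :
    PySem.Int.band n (n - 1) = ((n.toNat &&& (n.toNat - 1) : Nat) : Int) := by
  simp only [PySem.Int.band, if_pos (by omega : (0:Int) ≤ n),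
    if_pos (by omega : (0:Int) ≤ n - 1)]
  congr 2
  omega

theorem odd_land_pred (a : Nat) (h : a % 2 = 1) : a &&& (a - 1) = a - 1 := by
  apply Nat.eq_of_testBit_eq
  intro i
  rw [Nat.testBit_land]
  cases i with
  | zero =>
    have h1 : (a - 1) % 2 = 0 := by omega
    simp [Nat.testBit_zero, h, h1]
  | succ i =>
    simp only [Nat.testBit_add_one]
    rw [(by omega : (a - 1) / 2 = a / 2), Bool.and_self]

theorem even_land_pred (m : Nat) (h : 1 ≤ m) :
    (2 * m) &&& (2 * m - 1) = 2 * (m &&& (m - 1)) := by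
  apply Nat.eq_of_testBit_eq
  intro i
  rw [Nat.testBit_land]
  cases i with
  | zero => simp [Nat.testBit_zero, Nat.mul_mod_right]
  | succ i =>
    simp only [Nat.testBit_add_one]
    rw [(by omega : 2 * m / 2 = m), (by omega : (2 * m - 1) / 2 = m - 1),
      (by omega : 2 * (m &&& (m - 1)) / 2 = m &&& (m - 1)), Nat.testBit_land]

theorem pow2_of_land_pred_zero : ∀ a : Nat, 0 < a → a &&& (a - 1) = 0 → ∃ k, a = 2 ^ k := by
  intro a
  induction a using Nat.strong_induction_on with
  | _ a ih =>
    intro ha h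
    rcases Nat.even_or_odd a with he | ho
    · obtain ⟨m, hm⟩ := he
      have hm' : a = 2 * m := by omega
      rw [hm', even_land_pred m (by omega)] at h
      obtain ⟨k, hk⟩ := ih m (by omega) (by omega) (by omega)
      exact ⟨k + 1, by rw [hm', hk]; ring⟩
    · rw [odd_land_pred a (Nat.odd_iff.mp ho)] at h
      exact ⟨0, by omega⟩

theorem powLoop_two_pow (k : Nat) (c : Int) : powLoop ((2:Int) ^ k) c = c + k := by
  induction k generalizing c with
  | zero => rw [powLoop]; norm_num
  | succ k ih =>
    have hp : (1:Int) ≤ 2 ^ k := one_le_pow₀ (by norm_num)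
    have he : (2:Int) ^ (k + 1) = 2 * 2 ^ k := by ring
    rw [powLoop, if_pos (by omega)]
    have hs : (2:Int) ^ (k + 1) >>> (1 : Nat) = 2 ^ k := by
      have := Int.shiftRight_eq_div_pow ((2:Int) ^ (k + 1)) 1
      simp only [pow_one] at this
      rw [this, he]
      push_cast
      exact Int.mul_ediv_cancel_left _ (by norm_num)
    rw [hs, ih]
    push_cast
    ring

theorem pymod_pos (x m : Int) (hm : 0 ≤ m) : PySem.Int.mod x m = x % m := by
  simp [PySem.Int.mod, Int.fmod_eq_emod, hm]

theorem two_pow_mod_three (k : Nat) : 2 ^ k % 3 = if k % 2 = 0 then 1 else 2 := by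
  induction k with
  | zero => simp
  | succ k ih =>
    rw [pow_succ, Nat.mul_mod, ih]
    by_cases h : k % 2 = 0
    · rw [if_pos h, if_neg (by omega)]
    · rw [if_neg h, if_pos (by omega)]

-- ===== VERDICT (by name: the statement is the Claim_ definition above) =====
theorem power4_spec : Claim_unchanged_power4 := by
  intro n _ hD
  rcases lt_trichotomy n 0 with hneg | hz | hpos
  · have hb := band_pred_neg n hneg
    unfold power4 power4_alt
    rw [if_neg (by omega)]
    simp [show ¬ (0 < n) by omega]
  · exact absurd hz hD
  · have hb := band_pred_pos n hpos
    by_cases hg : n.toNat &&& (n.toNat - 1) = 0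
    · obtain ⟨k, hk⟩ := pow2_of_land_pred_zero n.toNat (by omega) hg
      have hn : n = (2:Int) ^ k := by
        have : n = ((2 ^ k : Nat) : Int) := by omega
        rw [this]; push_cast; ring
      have hband : PySem.Int.band n (n - 1) = 0 := by rw [hb, hg]; rfl
      have hloop : powLoop n 0 = (k : Int) := by rw [hn, powLoop_two_pow]; ring
      have hm3 : PySem.Int.mod n 3 = ((2 ^ k % 3 : Nat) : Int) := by
        rw [pymod_pos n 3 (by norm_num), hn]
        push_cast
        rfl
      unfold power4 power4_alt
      rw [if_pos hband, hloop, pymod_pos _ 2 (by norm_num), hm3, two_pow_mod_three]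
      by_cases hpar : k % 2 = 0
      · simp [hpar, hpos, hband]
        omega
      · have : (k : Int) % 2 = 1 := by omega
        simp [hpar, this]
    · have hband : PySem.Int.band n (n - 1) ≠ 0 := by
        rw [hb]
        exact_mod_cast hg
      unfold power4 power4_alt
      rw [if_neg hband]
      simp [hband]

theorem power4_zero_eq : power4 0 = true := by
  unfold power4
  rw [powLoop]
  decide

theorem power4_changed : Claim_changed_power4 := by
  unfold Claim_changed_power4
  refine ⟨by decide, by decide, ?_, by decide, by decide⟩
  exact power4_zero_eq

theorem power4_tight : Claim_exact_power4 := by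
  intro n _ hz
  rw [hz, power4_zero_eq]
  decide
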